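-- pv_equiv track=rewrite | github.com/joaoperfig/MagicBook | booknames_generator.py | iter_times
-- ===== SOURCE A (Python) =====
-- def iter_times(start_minutes: int | None, end_minutes: int | None):
--     for hour in range(24):
--         for minute in range(60):
--             total = hour * 60 + minute
--             if start_minutes is not None and total < start_minutes:
--                 continue
--             if end_minutes is not None and total > end_minutes:
--                 continue
--             yield hour, minute
-- ===== SOURCE B (Python) =====
-- def iter_times(start_minutes: int | None, end_minutes: int | None):
--     lo = 0 if start_minutes is None else max(0, start_minutes)
--     hi = 1439 if end_minutes is None else min(1439, end_minutes)
--     for total in range(lo, hi + 1):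
--         yield divmod(total, 60)
-- ===== Notes on version B (the rewrite author's own statement) =====
-- stated objective: simpler
-- what changed: Replaces the nested 24x60 hour/minute loops with two continue-guards by clamping the bounds to [0,1439] once and doing a single flat range(lo, hi+1) pass that derives (hour, minute) via divmod.
import Mathlib
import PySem

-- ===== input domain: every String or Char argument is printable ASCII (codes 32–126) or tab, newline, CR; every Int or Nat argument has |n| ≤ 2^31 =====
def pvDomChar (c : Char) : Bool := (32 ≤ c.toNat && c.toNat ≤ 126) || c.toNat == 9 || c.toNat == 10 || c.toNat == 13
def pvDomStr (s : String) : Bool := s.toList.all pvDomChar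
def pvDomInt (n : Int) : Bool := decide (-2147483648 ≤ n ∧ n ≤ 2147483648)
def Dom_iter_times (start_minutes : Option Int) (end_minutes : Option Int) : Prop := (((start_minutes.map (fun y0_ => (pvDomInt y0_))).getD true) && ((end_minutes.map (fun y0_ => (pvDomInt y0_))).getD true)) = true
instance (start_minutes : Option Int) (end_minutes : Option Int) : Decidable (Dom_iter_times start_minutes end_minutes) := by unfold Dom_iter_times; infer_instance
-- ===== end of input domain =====

-- B replaces A's nested 24×60 loops with two continue-guards by one flat pass over the
-- clamped minute range, deriving (hour, minute) via divmod (objective: simpler).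

-- ===== PORT A =====
-- literal port of A: nested loops over hours/minutes, two guards, append the kept pair
def iter_times (start_minutes : Option Int) (end_minutes : Option Int) : List (Int × Int) :=
  (PySem.List.pyRange 0 24 1).foldl (fun acc hour =>
    (PySem.List.pyRange 0 60 1).foldl (fun acc minute =>
      let total := hour * 60 + minute
      if (match start_minutes with | some sm => decide (total < sm) | none => false) then acc
      else if (match end_minutes with | some em => decide (total > em) | none => false) then acc
      else acc ++ [(hour, minute)]) acc) []

-- ===== PORT B =====
-- literal port of B: clamp the bounds, one flat range, divmod(total, 60)
def iter_times_alt (start_minutes : Option Int) (end_minutes : Option Int) : List (Int × Int) :=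
  let lo : Int := match start_minutes with | none => 0 | some sm => max 0 sm
  let hi : Int := match end_minutes with | none => 1439 | some em => min 1439 em
  (PySem.List.pyRange lo (hi + 1) 1).map (fun total =>
    (PySem.Int.floordiv total 60, PySem.Int.mod total 60))

-- ===== PRECONDITION & SPEC =====
def Spec_iter_times (start_minutes : Option Int) (end_minutes : Option Int) (out : List (Int × Int)) : Prop := out = iter_times_alt start_minutes end_minutes
instance (start_minutes : Option Int) (end_minutes : Option Int) (out : List (Int × Int)) : Decidable (Spec_iter_times start_minutes end_minutes out) := by unfold Spec_iter_times; infer_instance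

-- ===== CLAIM (what is proved, stated in full; the proofs are below) =====
def Claim_equal_iter_times : Prop := ∀ (start_minutes : Option Int) (end_minutes : Option Int), Dom_iter_times start_minutes end_minutes → Spec_iter_times start_minutes end_minutes (iter_times start_minutes end_minutes)

-- ===== LEMMAS AND PROOFS =====

-- clamped bounds
def pvLo (s : Option Int) : Int := match s with | none => 0 | some sm => max 0 sm
def pvHi (e : Option Int) : Int := match e with | none => 1439 | some em => min 1439 em

-- an 'if c1 then skip else if c2 then skip else keep' chain is a single filtered append
theorem pv_if_chain {α : Type} (c1 c2 : Bool) (a x : α) :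
    (if c1 then a else if c2 then a else x) = (if !c1 && !c2 then x else a) := by
  cases c1 <;> cases c2 <;> simp

-- filtering a unit-step range by an interval test yields the clipped range
theorem filter_pyRange_interval (lo hi : Int) : ∀ (a b : Int),
    (PySem.List.pyRange a b 1).filter (fun t => decide (lo ≤ t) && decide (t ≤ hi))
      = PySem.List.pyRange (max a lo) (min b (hi + 1)) 1 := by
  have main : ∀ (n : Nat) (a b : Int), (b - a).toNat = n →
      (PySem.List.pyRange a b 1).filter (fun t => decide (lo ≤ t) && decide (t ≤ hi))
        = PySem.List.pyRange (max a lo) (min b (hi + 1)) 1 := by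
    intro n
    induction n with
    | zero =>
      intro a b h
      have hba : b ≤ a := by omega
      rw [PySem.List.pyRange_one_eq_nil hba, PySem.List.pyRange_one_eq_nil (by omega)]
      rfl
    | succ n ih =>
      intro a b h
      have hab : a < b := by omega
      rw [PySem.List.pyRange_one_cons hab, List.filter_cons,
        ih (a + 1) b (by omega)]
      by_cases h1 : lo ≤ a
      · by_cases h2 : a ≤ hi
        · simp only [h1, h2, decide_true, Bool.and_self, if_true]
          have : max a lo = a := by omega
          have h' : max (a + 1) lo = a + 1 := by omega
          rw [this, h', ← PySem.List.pyRange_one_cons (by omega)]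
        · simp only [h2, decide_false, Bool.and_false]
          rw [if_neg (by simp), PySem.List.pyRange_one_eq_nil (by omega),
            PySem.List.pyRange_one_eq_nil (by omega)]
      · simp only [h1, decide_false, Bool.false_and]
        have hmx : max (a + 1) lo = max a lo := by omega
        rw [if_neg (by simp), hmx]
  intro a b; exact main (b - a).toNat a b rfl

-- the flat 0..1439 range decomposed as hours × minutes
theorem range1440_decomp : ∀ (k : Nat),
    PySem.List.pyRange 0 ((k : Int) * 60) 1
      = (PySem.List.pyRange 0 (k : Int) 1).flatMap
          (fun h => (PySem.List.pyRange 0 60 1).map (fun m => h * 60 + m)) := by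
  intro k
  induction k with
  | zero => simp [PySem.List.pyRange_one_eq_nil]
  | succ k ih =>
    have h1 : ((k + 1 : Nat) : Int) * 60 = (k : Int) * 60 + 60 := by push_cast; ring
    have h2 : ((k + 1 : Nat) : Int) = (k : Int) + 1 := by push_cast; ring
    rw [h1, h2,
      PySem.List.pyRange_one_append 0 ((k : Int) * 60) ((k : Int) * 60 + 60)
        (by positivity) (by omega),
      PySem.List.pyRange_one_succ_right (by positivity), ih,
      List.flatMap_append]
    congr 1
    simp only [List.flatMap_cons, List.flatMap_nil, List.append_nil]
    rw [PySem.List.pyRange_one ((k : Int) * 60) ((k : Int) * 60 + 60),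
      PySem.List.pyRange_one 0 60,
      show ((k : Int) * 60 + 60 - (k : Int) * 60).toNat = 60 by omega,
      show ((60 : Int) - 0).toNat = 60 by omega, List.map_map]
    congr 1
    funext j
    simp only [Function.comp]
    ring

-- A's nested loops, with the two guards abstracted, as flatMap/filter/map
theorem pv_loopA (p q : Int → Bool) :
    ((PySem.List.pyRange 0 24 1).foldl (fun acc hour =>
      (PySem.List.pyRange 0 60 1).foldl (fun acc minute =>
        if p (hour * 60 + minute) then acc
        else if q (hour * 60 + minute) then acc
        else acc ++ [(hour, minute)]) acc) [])
    = (PySem.List.pyRange 0 24 1).flatMap (fun h =>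
        ((PySem.List.pyRange 0 60 1).filter (fun m => !p (h * 60 + m) && !q (h * 60 + m))).map
          (fun m => (h, m))) := by
  have inner : ∀ (h : Int) (acc : List (Int × Int)),
      (PySem.List.pyRange 0 60 1).foldl (fun acc minute =>
        if p (h * 60 + minute) then acc
        else if q (h * 60 + minute) then acc
        else acc ++ [(h, minute)]) acc
      = acc ++ ((PySem.List.pyRange 0 60 1).filter
          (fun m => !p (h * 60 + m) && !q (h * 60 + m))).map (fun m => (h, m)) := by
    intro h acc
    rw [← PySem.List.foldl_append_if
      (p := fun m => !p (h * 60 + m) && !q (h * 60 + m)) (f := fun m => (h, m)) (acc := acc)]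
    congr 1
    funext acc m
    exact pv_if_chain _ _ _ _
  refine (PySem.List.foldl_congr_mem _ _ _ _ (fun acc h _ => inner h acc)).trans ?_
  simp [List.flatMap_def]

-- the hour/minute grid filtered by a condition on the total, as one filtered flat range
theorem pv_grid (c : Int → Bool) :
    (PySem.List.pyRange 0 24 1).flatMap (fun h =>
        ((PySem.List.pyRange 0 60 1).filter (fun m => c (h * 60 + m))).map (fun m => (h, m)))
    = ((PySem.List.pyRange 0 1440 1).filter c).map
        (fun t => (PySem.Int.floordiv t 60, PySem.Int.mod t 60)) := by
  have h1440 : (1440 : Int) = ((24 : Nat) : Int) * 60 := by norm_num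
  rw [h1440, range1440_decomp 24, show ((24 : Nat) : Int) = (24 : Int) by norm_num,
    List.filter_flatMap, List.map_flatMap]
  apply List.flatMap_congr
  intro h hmem
  have hh : 0 ≤ h ∧ h < 24 := PySem.List.mem_pyRange_one.mp hmem
  rw [List.filter_map, List.map_map]
  apply List.map_congr_left
  intro m hm
  have hm' : 0 ≤ m ∧ m < 60 := PySem.List.mem_pyRange_one.mp (List.mem_of_mem_filter hm)
  simp only [Function.comp]
  have hfd : PySem.Int.floordiv (h * 60 + m) 60 = h := by
    rw [PySem.Int.floordiv_eq_iff_of_pos (by norm_num)]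
    constructor <;> nlinarith [hm'.1, hm'.2]
  have hmod : PySem.Int.mod (h * 60 + m) 60 = m := by
    have := PySem.Int.floordiv_mul_add_mod (h * 60 + m) 60
    rw [hfd] at this; omega
  rw [hfd, hmod]

set_option maxRecDepth 8000 in
theorem iter_times_eq_mid (s e : Option Int) :
    iter_times s e
      = ((PySem.List.pyRange 0 1440 1).filter
          (fun t => decide (pvLo s ≤ t) && decide (t ≤ pvHi e))).map
          (fun t => (PySem.Int.floordiv t 60, PySem.Int.mod t 60)) := by
  unfold iter_times
  cases s with
  | none =>
    cases e with
    | none =>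
      refine (pv_loopA (fun _ => false) (fun _ => false)).trans
        ((pv_grid (fun _ => !false && !false)).trans ?_)
      refine congrArg (List.map _) (List.filter_congr ?_)
      intro t ht
      have ht' : 0 ≤ t ∧ t < 1440 := PySem.List.mem_pyRange_one.mp ht
      simp only [pvLo, pvHi, Bool.not_false, Bool.and_self]
      symm
      rw [Bool.and_eq_true, decide_eq_true_eq, decide_eq_true_eq]
      exact ⟨ht'.1, by omega⟩
    | some emv =>
      refine (pv_loopA (fun _ => false) (fun t => decide (t > emv))).trans
        ((pv_grid (fun t => !false && !decide (t > emv))).trans ?_)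
      refine congrArg (List.map _) (List.filter_congr ?_)
      intro t ht
      have ht' : 0 ≤ t ∧ t < 1440 := PySem.List.mem_pyRange_one.mp ht
      simp only [pvLo, pvHi, Bool.not_false]
      congr 1
      · symm; rw [decide_eq_true_eq]; omega
      · rw [← decide_not, decide_eq_decide]; omega
  | some sm =>
    cases e with
    | none =>
      refine (pv_loopA (fun t => decide (t < sm)) (fun _ => false)).trans
        ((pv_grid (fun t => !decide (t < sm) && !false)).trans ?_)
      refine congrArg (List.map _) (List.filter_congr ?_)
      intro t ht
      have ht' : 0 ≤ t ∧ t < 1440 := PySem.List.mem_pyRange_one.mp ht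
      simp only [pvLo, pvHi, Bool.not_false]
      congr 1
      · rw [← decide_not, decide_eq_decide]; omega
      · symm; rw [decide_eq_true_eq]; omega
    | some emv =>
      refine (pv_loopA (fun t => decide (t < sm)) (fun t => decide (t > emv))).trans
        ((pv_grid (fun t => !decide (t < sm) && !decide (t > emv))).trans ?_)
      refine congrArg (List.map _) (List.filter_congr ?_)
      intro t ht
      have ht' : 0 ≤ t ∧ t < 1440 := PySem.List.mem_pyRange_one.mp ht
      simp only [pvLo, pvHi]
      congr 1
      · rw [← decide_not, decide_eq_decide]; omega
      · rw [← decide_not, decide_eq_decide]; omega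

theorem iter_times_alt_eq_mid (s e : Option Int) :
    iter_times_alt s e
      = ((PySem.List.pyRange 0 1440 1).filter
          (fun t => decide (pvLo s ≤ t) && decide (t ≤ pvHi e))).map
          (fun t => (PySem.Int.floordiv t 60, PySem.Int.mod t 60)) := by
  have hlo : 0 ≤ pvLo s := by cases s <;> simp only [pvLo] <;> omega
  have hhi : pvHi e ≤ 1439 := by cases e <;> simp only [pvHi] <;> omega
  rw [filter_pyRange_interval (pvLo s) (pvHi e) 0 1440]
  have h1 : max 0 (pvLo s) = pvLo s := by omega
  have h2 : min 1440 (pvHi e + 1) = pvHi e + 1 := by omega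
  rw [h1, h2]
  rfl

-- ===== VERDICT (by name: the statement is the Claim_ definition above) =====
theorem iter_times_spec : Claim_equal_iter_times := by
  intro s e _
  unfold Spec_iter_times
  rw [iter_times_eq_mid, iter_times_alt_eq_mid]
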